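-- pv_equiv track=rewrite | github.com/ansh1113/cooking-humanoid-vla | project2/train_nuclear.py | get_curriculum_order
-- ===== SOURCE A (Python) =====
-- from collections import Counter
--
-- def get_curriculum_order(data, vocab):
--     action_counts = Counter(d['action'] for d in data)
--
--     # Easy = high sample count, Hard = low sample
--     easy_actions = {a for a, c in action_counts.items() if c >= 60}
--     medium_actions = {a for a, c in action_counts.items() if 30 <= c < 60}
--     hard_actions = {a for a, c in action_counts.items() if c < 30}
--
--     # Phase 1: Easy only
--     phase1 = [d for d in data if d['action'] in easy_actions]
--     # Phase 2: Easy + Medium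
--     phase2 = [d for d in data if d['action'] in easy_actions | medium_actions]
--     # Phase 3: All
--     phase3 = data
--
--     return phase1, phase2, phase3
-- ===== SOURCE B (Python) =====
-- def get_curriculum_order(data, vocab):
--     # Group sample indices by action, then select whole groups and merge
--     # their index lists back into data order by sorting.
--     groups = {}
--     for i, d in enumerate(data):
--         groups.setdefault(d['action'], []).append(i)
--     idx1 = sorted(i for g in groups.values() if len(g) >= 60 for i in g)
--     idx2 = sorted(i for g in groups.values() if len(g) >= 30 for i in g)
--     return [data[i] for i in idx1], [data[i] for i in idx2], data
-- ===== Notes on version B (the rewrite author's own statement) =====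
-- stated objective: alternative
-- what changed: B replaces A's count-then-filter passes by a group-by: it buckets sample indices per action in one dict pass, selects whole buckets by their size, merges the selected index lists back into data order by sorting, and materialises the phases by indexing into data.
import Mathlib
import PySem

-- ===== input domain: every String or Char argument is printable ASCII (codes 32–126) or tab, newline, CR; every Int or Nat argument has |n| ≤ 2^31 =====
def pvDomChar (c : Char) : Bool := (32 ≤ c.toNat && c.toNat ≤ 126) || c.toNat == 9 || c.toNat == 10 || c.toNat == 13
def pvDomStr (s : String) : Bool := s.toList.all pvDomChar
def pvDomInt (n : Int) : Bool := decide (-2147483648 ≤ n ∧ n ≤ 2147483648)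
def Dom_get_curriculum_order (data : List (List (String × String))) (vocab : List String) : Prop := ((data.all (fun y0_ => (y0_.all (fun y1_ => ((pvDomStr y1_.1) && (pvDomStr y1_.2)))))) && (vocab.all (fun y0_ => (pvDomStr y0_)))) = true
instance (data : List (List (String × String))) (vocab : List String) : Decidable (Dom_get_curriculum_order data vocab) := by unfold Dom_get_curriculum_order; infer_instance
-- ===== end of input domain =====

-- B groups sample indices per action and merges selected whole groups by sorting; phase3 is the same `data` in both.

-- d['action'] (KeyError = none is excluded by Pre_; the "" default is never reached there)
def pvAct (d : List (String × String)) : String :=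
  (PySem.Dict.get? ⟨d⟩ "action").getD ""

-- ===== PORT A =====
def get_curriculum_order (data : List (List (String × String))) (vocab : List String) : (List (List (String × String))) × (List (List (String × String))) × (List (List (String × String))) :=
  let action_counts := PySem.Dict.counter (data.map pvAct)
  let easy_actions := PySem.Set.ofList ((action_counts.items.filter (fun p => decide (60 ≤ p.2))).map Prod.fst)
  let medium_actions := PySem.Set.ofList ((action_counts.items.filter (fun p => decide (30 ≤ p.2) && decide (p.2 < 60))).map Prod.fst)
  let _hard_actions := PySem.Set.ofList ((action_counts.items.filter (fun p => decide (p.2 < 30))).map Prod.fst)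
  let phase1 := data.filter (fun d => easy_actions.contains (pvAct d))
  let phase2 := data.filter (fun d => (easy_actions.union medium_actions).contains (pvAct d))
  let phase3 := data
  (phase1, phase2, phase3)

-- ===== PORT B =====
def get_curriculum_order_alt (data : List (List (String × String))) (vocab : List String) : (List (List (String × String))) × (List (List (String × String))) × (List (List (String × String))) :=
  -- groups.setdefault(d['action'], []).append(i)  =  modify key [] (· ++ [i])
  let groups := (PySem.List.enumerate data).foldl
      (fun g p => PySem.Dict.modify g (pvAct p.2) [] (· ++ [p.1])) PySem.Dict.empty
  let idx1 := PySem.List.sorted ((groups.values.filter (fun g => decide (60 ≤ g.length))).flatten) (fun x => x) false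
  let idx2 := PySem.List.sorted ((groups.values.filter (fun g => decide (30 ≤ g.length))).flatten) (fun x => x) false
  (idx1.map (fun i => PySem.List.pyGetD data i []),
   idx2.map (fun i => PySem.List.pyGetD data i []),
   data)

-- ===== PRECONDITION & SPEC =====
-- Pre_ excludes exactly the inputs where Python A raises KeyError: a sample dict without an 'action' key.
def Pre_get_curriculum_order (data : List (List (String × String))) (vocab : List String) : Prop :=
  ∀ d ∈ data, (PySem.Dict.get? (PySem.Dict.mk d) "action").isSome = true
instance (data : List (List (String × String))) (vocab : List String) : Decidable (Pre_get_curriculum_order data vocab) := by unfold Pre_get_curriculum_order; infer_instance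
def pvWitness_get_curriculum_order : (List (List (String × String))) × List String :=
  ([[("action", "stir")], [("action", "chop"), ("tool", "knife")]], ["stir", "chop"])

def Spec_get_curriculum_order (data : List (List (String × String))) (vocab : List String) (out : (List (List (String × String))) × (List (List (String × String))) × (List (List (String × String)))) : Prop := out = get_curriculum_order_alt data vocab
instance (data : List (List (String × String))) (vocab : List String) (out : (List (List (String × String))) × (List (List (String × String))) × (List (List (String × String)))) : Decidable (Spec_get_curriculum_order data vocab out) := by unfold Spec_get_curriculum_order; infer_instance

-- ===== CLAIM (what is proved, stated in full; the proofs are below) =====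
def Claim_equal_get_curriculum_order : Prop := ∀ (data : List (List (String × String))) (vocab : List String), Dom_get_curriculum_order data vocab → Pre_get_curriculum_order data vocab → Spec_get_curriculum_order data vocab (get_curriculum_order data vocab)

-- ===== LEMMAS AND PROOFS =====

-- Membership in one of A's threshold sets, for an action that occurs in the data,
-- is exactly the predicate on its count.
theorem pv_contains_filter_counter (acts : List String) (a : String) (ha : a ∈ acts) (P : Int → Bool) :
    (PySem.Set.ofList (((PySem.Dict.counter acts).items.filter (fun p => P p.2)).map Prod.fst)).contains a
      = P ((acts.count a : Int)) := by
  rw [Bool.eq_iff_iff, PySem.Set.contains_iff, PySem.Set.mem_ofList, PySem.Dict.items_counter]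
  simp only [List.mem_map, List.mem_filter]
  constructor
  · rintro ⟨p, ⟨⟨k, hk, rfl⟩, hP⟩, rfl⟩
    exact hP
  · intro hP
    exact ⟨(a, (acts.count a : Int)), ⟨⟨a, (PySem.Set.mem_ofList acts a).mpr ha, rfl⟩, hP⟩, rfl⟩

-- Merging whole key-buckets of l (for the qualifying keys) is a permutation of
-- filtering l by the qualification of its own key.
theorem pv_perm_flatMap {α : Type} (key : α → String) (Q : String → Bool) :
    ∀ (ks : List String) (l : List α), ks.Nodup → (∀ p ∈ l, key p ∈ ks) →
    ((ks.filter Q).flatMap (fun a => l.filter (fun p => key p == a))).Perm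
      (l.filter (fun p => Q (key p))) := by
  intro ks
  induction ks with
  | nil =>
      intro l _ hcov
      have hl : l = [] := List.eq_nil_iff_forall_not_mem.mpr (fun x hx => by simpa using hcov x hx)
      simp [hl]
  | cons a ks ih =>
      intro l hnd hcov
      have hna : a ∉ ks := (List.nodup_cons.mp hnd).1
      have hndk : ks.Nodup := (List.nodup_cons.mp hnd).2
      -- the rest of the buckets only sees the part of l with key ≠ a
      have hrest : ∀ b ∈ ks, l.filter (fun p => key p == b)
          = (l.filter (fun p => !(key p == a))).filter (fun p => key p == b) := by
        intro b hb
        rw [List.filter_filter]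
        apply List.filter_congr
        intro x _
        have hba : b ≠ a := fun he => hna (he ▸ hb)
        by_cases h : key x = b
        · simp [h, hba]
        · simp [h]
      have hcov' : ∀ p ∈ l.filter (fun p => !(key p == a)), key p ∈ ks := by
        intro p hp
        rcases List.mem_filter.mp hp with ⟨hpl, hne⟩
        rcases List.mem_cons.mp (hcov p hpl) with h | h
        · simp_all
        · exact h
      have ihp := ih (l.filter (fun p => !(key p == a))) hndk hcov'
      have hflat : (ks.filter Q).flatMap (fun b => l.filter (fun p => key p == b))
          = (ks.filter Q).flatMap (fun b => (l.filter (fun p => !(key p == a))).filter (fun p => key p == b)) := by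
        apply List.flatMap_congr
        intro b hb
        exact hrest b (List.mem_filter.mp hb).1
      by_cases hQ : Q a = true
      · rw [List.filter_cons_of_pos hQ, List.flatMap_cons, hflat]
        -- RHS splits along key == a
        have hsplit : ((l.filter (fun p => key p == a) ++ l.filter (fun p => !(key p == a))).filter
            (fun p => Q (key p))).Perm (l.filter (fun p => Q (key p))) :=
          (List.filter_append_perm _ l).filter _
        rw [List.filter_append] at hsplit
        have h1 : (l.filter (fun p => key p == a)).filter (fun p => Q (key p))
            = l.filter (fun p => key p == a) := by
          apply List.filter_eq_self.mpr
          intro x hx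
          have := (List.mem_filter.mp hx).2
          have : key x = a := by simpa using this
          simp [this, hQ]
        rw [h1] at hsplit
        exact (hsplit.symm.trans ((ihp.append_left _).symm)).symm
      · rw [List.filter_cons_of_neg hQ, hflat]
        have hR : l.filter (fun p => Q (key p))
            = (l.filter (fun p => !(key p == a))).filter (fun p => Q (key p)) := by
          rw [List.filter_filter]
          apply List.filter_congr
          intro x _
          by_cases h : Q (key x) = true
          · have : ¬ key x = a := fun he => by rw [he] at h; exact hQ h
            simp [h, this]
          · simp [h]
        rw [hR]
        exact ihp

-- The filtered enumeration projected to the elements is the filtered list.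
theorem pv_map_snd_filter_enumerate {α : Type} (P : α → Bool) (xs : List α) (s : Int) :
    (((PySem.List.enumerate xs s).filter (fun p => P p.2)).map (·.2)) = xs.filter P := by
  induction xs generalizing s with
  | nil => simp [PySem.List.enumerate_nil]
  | cons x t ih =>
      rw [PySem.List.enumerate_cons]
      by_cases h : P x = true <;> simp [h, ih]

-- B's phase-t index pipeline evaluates to the canonical filter of data.
theorem pv_alt_phase (data : List (List (String × String))) (t : Nat) :
    (PySem.List.sorted
        ((((PySem.List.enumerate data).foldl
            (fun g p => PySem.Dict.modify g (pvAct p.2) [] (· ++ [p.1])) PySem.Dict.empty).values.filter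
              (fun g => decide (t ≤ g.length))).flatten) (fun x => x) false).map
      (fun i => PySem.List.pyGetD data i [])
      = data.filter (fun d => decide (t ≤ (data.map pvAct).count (pvAct d))) := by
  have hfold : (PySem.List.enumerate data).foldl
        (fun g p => PySem.Dict.modify g (pvAct p.2) [] (· ++ [p.1])) PySem.Dict.empty
      = ((PySem.List.enumerate data).map (fun p => (pvAct p.2, p.1))).foldl
        (fun d q => PySem.Dict.modify d q.1 [] (· ++ [q.2])) PySem.Dict.empty := by
    rw [List.foldl_map]
  set l := PySem.List.enumerate data with hl
  set acts := data.map pvAct with hacts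
  have hsnd : l.map (·.2) = data := PySem.List.map_snd_enumerate data 0
  have hget : ∀ a, ((l.foldl (fun g p => PySem.Dict.modify g (pvAct p.2) [] (· ++ [p.1]))
        PySem.Dict.empty).getD a []) = (l.filter (fun p => pvAct p.2 == a)).map (·.1) := by
    intro a
    rw [hfold, PySem.Dict.getD_foldl_modify_append]
    rw [PySem.Dict.getD_empty, List.nil_append, List.filter_map, List.map_map]
    rfl
  have hnd : (l.foldl (fun g p => PySem.Dict.modify g (pvAct p.2) [] (· ++ [p.1]))
        PySem.Dict.empty).keys.Nodup :=
    PySem.Dict.nodup_keys_foldl_modify_key l (fun p => pvAct p.2) [] (fun _ p => (· ++ [p.1]))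
      PySem.Dict.empty (by simp [PySem.Dict.keys_empty])
  have hkeys : (l.foldl (fun g p => PySem.Dict.modify g (pvAct p.2) [] (· ++ [p.1]))
        PySem.Dict.empty).keys = PySem.Set.ofList acts := by
    rw [PySem.Dict.keys_foldl_modify_key, PySem.Dict.keys_empty, PySem.Set.update_nil_left]
    congr 1
    rw [show (fun p => pvAct (Prod.snd p)) = pvAct ∘ (·.2) from rfl, ← List.map_map, hsnd]
  have hvals : (l.foldl (fun g p => PySem.Dict.modify g (pvAct p.2) [] (· ++ [p.1]))
        PySem.Dict.empty).values
      = (PySem.Set.ofList acts).map (fun k => (l.filter (fun p => pvAct p.2 == k)).map (·.1)) := by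
    rw [PySem.Dict.values_eq_map_keys _ hnd [], hkeys]
    exact List.map_congr_left (fun a _ => hget a)
  have hlen : ∀ a, ((l.filter (fun p => pvAct p.2 == a)).map (·.1)).length = acts.count a := by
    intro a
    rw [List.length_map, ← List.countP_eq_length_filter]
    rw [show (fun p => pvAct (Prod.snd p) == a) = ((fun d => pvAct d == a) ∘ (·.2)) from rfl,
      ← List.countP_map, hsnd]
    rw [hacts, List.count, List.countP_map]
    rfl
  rw [hvals]
  rw [List.filter_map]
  rw [show ((fun g : List Int => decide (t ≤ g.length)) ∘ fun k => (l.filter (fun p => pvAct p.2 == k)).map (·.1))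
      = (fun a => decide (t ≤ acts.count a)) from funext (fun a => by simp [hlen a])]
  rw [← List.flatMap_def, ← List.map_flatMap]
  have hperm := (pv_perm_flatMap (fun p => pvAct p.2) (fun a => decide (t ≤ acts.count a))
      (PySem.Set.ofList acts) l (PySem.Set.nodup_ofList acts) ?_).map (·.1)
  · have hpw : ((l.filter (fun p => decide (t ≤ acts.count (pvAct p.2)))).map (·.1)).Pairwise (· < ·) :=
      List.Pairwise.map (f := fun p : Int × List (String × String) => p.1)
        (fun _ _ h => h) ((PySem.List.pairwise_lt_enumerate data 0).filter _)
    rw [PySem.List.sorted_eq_of_perm_of_pairwise_lt _ _ _ hperm.symm hpw]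
    rw [List.map_map]
    have hmem : ∀ p ∈ l.filter (fun p => decide (t ≤ acts.count (pvAct p.2))),
        ((fun i => PySem.List.pyGetD data i []) ∘ (·.1)) p = (·.2) p := by
      intro p hp
      have hpl : p ∈ l := (List.mem_filter.mp hp).1
      rw [hl, PySem.List.mem_enumerate_iff] at hpl
      rcases hpl with ⟨k, hk, rfl⟩
      simp [PySem.List.pyGetD_natCast, List.getElem?_eq_getElem hk]
    rw [List.map_congr_left hmem]
    exact pv_map_snd_filter_enumerate (fun d => decide (t ≤ acts.count (pvAct d))) data 0
  · intro p hp
    rw [PySem.Set.mem_ofList, hacts]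
    rw [hl, PySem.List.mem_enumerate_iff] at hp
    rcases hp with ⟨k, hk, rfl⟩
    exact List.mem_map.mpr ⟨data[k], by simp, rfl⟩

theorem get_curriculum_order_eq (data : List (List (String × String))) (vocab : List String) :
    get_curriculum_order data vocab = get_curriculum_order_alt data vocab := by
  simp only [get_curriculum_order, get_curriculum_order_alt]
  rw [pv_alt_phase data 60, pv_alt_phase data 30]
  have h1 : ∀ d ∈ data,
      (PySem.Set.ofList ((((PySem.Dict.counter (data.map pvAct)).items.filter
          (fun p => decide (60 ≤ p.2))).map Prod.fst))).contains (pvAct d)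
        = decide (60 ≤ (data.map pvAct).count (pvAct d)) := by
    intro d hd
    rw [pv_contains_filter_counter (data.map pvAct) (pvAct d)
       (List.mem_map.mpr ⟨d, hd, rfl⟩) (fun c => decide (60 ≤ c))]
    rw [Bool.eq_iff_iff]
    simp only [decide_eq_true_eq]
    omega
  have h2 : ∀ d ∈ data,
      ((PySem.Set.ofList ((((PySem.Dict.counter (data.map pvAct)).items.filter
          (fun p => decide (60 ≤ p.2))).map Prod.fst))).union
       (PySem.Set.ofList ((((PySem.Dict.counter (data.map pvAct)).items.filter
          (fun p => decide (30 ≤ p.2) && decide (p.2 < 60))).map Prod.fst)))).contains (pvAct d)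
        = decide (30 ≤ (data.map pvAct).count (pvAct d)) := by
    intro d hd
    have ha : pvAct d ∈ data.map pvAct := List.mem_map.mpr ⟨d, hd, rfl⟩
    rw [Bool.eq_iff_iff, PySem.Set.contains_iff, PySem.Set.mem_union,
      ← PySem.Set.contains_iff, ← PySem.Set.contains_iff,
      pv_contains_filter_counter _ _ ha (fun c => decide (60 ≤ c)),
      pv_contains_filter_counter _ _ ha (fun c => decide (30 ≤ c) && decide (c < 60))]
    simp only [Bool.and_eq_true, decide_eq_true_eq]
    omega
  rw [List.filter_congr h1, List.filter_congr h2]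

-- ===== VERDICT (by name: the statement is the Claim_ definition above) =====
theorem get_curriculum_order_spec : Claim_equal_get_curriculum_order := by
  intro data vocab _ _
  unfold Spec_get_curriculum_order
  exact get_curriculum_order_eq data vocab
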